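-- pv_equiv track=rewrite | github.com/Leapense/problems | 17487번： 타자 연습/타자 연습.py | count_keystrokes
-- ===== SOURCE A (Python) =====
-- def count_keystrokes(sentence):
--     left_hand = "qwertyasdfgzxcvb"
--     right_hand = "uiophjklnm"
--     left, right, other = 0, 0, 0
--
--     for s in sentence:
--         if s.isupper():
--             other += 1
--
--     for s in sentence.lower():
--         if s in right_hand:
--             right += 1
--         elif s in left_hand:
--             left += 1
--         else:
--             other += 1
--
--     while other != 0:
--         if left <= right:
--             left += 1
--         else:
--             right += 1
--         other -= 1
--
--     return left, right
-- ===== SOURCE B (Python) =====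
-- def count_keystrokes(sentence):
--     left_hand = set("qwertyasdfgzxcvb")
--     right_hand = set("uiophjklnm")
--     left = right = other = 0
--     for s in sentence:
--         if s.isupper():
--             other += 1
--         c = s.lower()
--         if c in right_hand:
--             right += 1
--         elif c in left_hand:
--             left += 1
--         else:
--             other += 1
--     hi, lo = max(left, right), min(left, right)
--     gap = hi - lo
--     if other <= gap:
--         if left <= right:
--             left += other
--         else:
--             right += other
--     else:
--         rem = other - gap
--         left = hi + (rem + 1) // 2
--         right = hi + rem // 2
--     return left, right
-- ===== Notes on version B (the rewrite author's own statement) =====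
-- stated objective: simpler
-- what changed: One classification pass instead of two, and the while-loop that distributes ambiguous keystrokes one at a time is replaced by closed-form arithmetic (fill the smaller hand up to the larger, then split the remainder with the ceiling going to the left hand).
import Mathlib
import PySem

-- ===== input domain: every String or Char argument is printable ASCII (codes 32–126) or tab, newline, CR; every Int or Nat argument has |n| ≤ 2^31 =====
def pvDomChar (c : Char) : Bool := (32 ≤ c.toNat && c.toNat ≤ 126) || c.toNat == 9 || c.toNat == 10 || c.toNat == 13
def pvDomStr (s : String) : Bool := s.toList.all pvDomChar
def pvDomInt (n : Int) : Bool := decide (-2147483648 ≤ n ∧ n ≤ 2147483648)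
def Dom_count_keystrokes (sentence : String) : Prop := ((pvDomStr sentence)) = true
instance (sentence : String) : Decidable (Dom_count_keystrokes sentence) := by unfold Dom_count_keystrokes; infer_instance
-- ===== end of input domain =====

-- B replaces A's two classification passes and its one-keystroke-at-a-time while loop
-- by a single pass and closed-form arithmetic (objective: simpler).

-- ===== PORT A =====
-- A's while loop: while other != 0, add one keystroke to the smaller hand (tie → left)
def pvBalance (l r o : Nat) : Nat × Nat :=
  match o with
  | 0 => (l, r)
  | o + 1 => if l ≤ r then pvBalance (l + 1) r o else pvBalance l (r + 1) o

def count_keystrokes (sentence : String) : Int × Int :=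
  let left_hand := "qwertyasdfgzxcvb".toList
  let right_hand := "uiophjklnm".toList
  -- first loop: count uppercase characters into other
  let other0 : Nat := sentence.toList.foldl
    (fun o s => if PySem.Chars.isupper s then o + 1 else o) 0
  -- second loop: classify the characters of sentence.lower()
  let lro : Nat × Nat × Nat := (PySem.Chars.lower sentence.toList).foldl
    (fun (acc : Nat × Nat × Nat) s =>
      if s ∈ right_hand then (acc.1, acc.2.1 + 1, acc.2.2)
      else if s ∈ left_hand then (acc.1 + 1, acc.2.1, acc.2.2)
      else (acc.1, acc.2.1, acc.2.2 + 1)) (0, 0, other0)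
  let p := pvBalance lro.1 lro.2.1 lro.2.2
  ((p.1 : Int), (p.2 : Int))

-- ===== PORT B =====
def count_keystrokes_alt (sentence : String) : Int × Int :=
  let left_hand := "qwertyasdfgzxcvb".toList
  let right_hand := "uiophjklnm".toList
  -- single pass: uppercase into other, the lowered character into its hand (or other)
  let lro : Nat × Nat × Nat := sentence.toList.foldl
    (fun (acc : Nat × Nat × Nat) s =>
      let o := if PySem.Chars.isupper s then acc.2.2 + 1 else acc.2.2
      if PySem.Chars.lowerChar s ∈ right_hand then (acc.1, acc.2.1 + 1, o)
      else if PySem.Chars.lowerChar s ∈ left_hand then (acc.1 + 1, acc.2.1, o)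
      else (acc.1, acc.2.1, o + 1)) (0, 0, 0)
  let l := lro.1
  let r := lro.2.1
  let o := lro.2.2
  let hi := max l r
  let lo := min l r
  let gap := hi - lo
  if o ≤ gap then
    if l ≤ r then (((l + o : Nat) : Int), ((r : Nat) : Int))
    else (((l : Nat) : Int), ((r + o : Nat) : Int))
  else
    let rem := o - gap
    (((hi + (rem + 1) / 2 : Nat) : Int), ((hi + rem / 2 : Nat) : Int))

-- ===== PRECONDITION & SPEC =====
def Spec_count_keystrokes (sentence : String) (out : Int × Int) : Prop := out = count_keystrokes_alt sentence
instance (sentence : String) (out : Int × Int) : Decidable (Spec_count_keystrokes sentence out) := by unfold Spec_count_keystrokes; infer_instance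

-- ===== CLAIM (what is proved, stated in full; the proofs are below) =====
def Claim_equal_count_keystrokes : Prop := ∀ (sentence : String), Dom_count_keystrokes sentence → Spec_count_keystrokes sentence (count_keystrokes sentence)

-- ===== LEMMAS AND PROOFS =====

-- A's while loop equals B's closed-form distribution
theorem pvBalance_closed : ∀ (o l r : Nat), pvBalance l r o =
    (if o ≤ max l r - min l r then (if l ≤ r then (l + o, r) else (l, r + o))
     else (max l r + (o - (max l r - min l r) + 1) / 2,
           max l r + (o - (max l r - min l r)) / 2)) := by
  intro o
  induction o with
  | zero =>
      intro l r
      simp only [pvBalance]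
      split_ifs <;> rw [Prod.mk.injEq] <;> omega
  | succ o ih =>
      intro l r
      simp only [pvBalance]
      split_ifs with h <;> rw [ih] <;> split_ifs <;> rw [Prod.mk.injEq] <;> omega

-- A's uppercase-counting loop is an initial value plus a countP
theorem pvUpperCount (cs : List Char) (o : Nat) :
    cs.foldl (fun o s => if PySem.Chars.isupper s then o + 1 else o) o
      = o + cs.countP (fun s => PySem.Chars.isupper s) := by
  induction cs generalizing o with
  | nil => simp
  | cons c cs ih => simp only [List.foldl_cons, List.countP_cons, ih]; split_ifs <;> omega

theorem pvLower_eq_map (cs : List Char) : PySem.Chars.lower cs = cs.map PySem.Chars.lowerChar := rfl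

-- A's classification loop over the lowered characters, as three countP's
theorem pvClassify (rh lh : List Char) : ∀ (cl : List Char) (l r o : Nat),
    cl.foldl (fun (acc : Nat × Nat × Nat) s =>
      if s ∈ rh then (acc.1, acc.2.1 + 1, acc.2.2)
      else if s ∈ lh then (acc.1 + 1, acc.2.1, acc.2.2)
      else (acc.1, acc.2.1, acc.2.2 + 1)) (l, r, o)
    = (l + cl.countP (fun c => c ∉ rh ∧ c ∈ lh),
       r + cl.countP (fun c => c ∈ rh),
       o + cl.countP (fun c => c ∉ rh ∧ c ∉ lh)) := by
  intro cl
  induction cl with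
  | nil => simp
  | cons c cs ih =>
      intro l r o
      simp only [List.foldl_cons, List.countP_cons]
      by_cases h1 : c ∈ rh
      · rw [if_pos h1, ih, Prod.mk.injEq, Prod.mk.injEq]
        refine ⟨?_, ?_, ?_⟩ <;> simp [h1] <;> omega
      · by_cases h2 : c ∈ lh
        · rw [if_neg h1, if_pos h2, ih, Prod.mk.injEq, Prod.mk.injEq]
          refine ⟨?_, ?_, ?_⟩ <;> simp [h1, h2] <;> omega
        · rw [if_neg h1, if_neg h2, ih, Prod.mk.injEq, Prod.mk.injEq]
          refine ⟨?_, ?_, ?_⟩ <;> simp [h1, h2] <;> omega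

-- B's single combined pass, as countP's
theorem pvClassifyB (rh lh : List Char) : ∀ (cs : List Char) (l r o : Nat),
    cs.foldl (fun (acc : Nat × Nat × Nat) s =>
      let o := if PySem.Chars.isupper s then acc.2.2 + 1 else acc.2.2
      if PySem.Chars.lowerChar s ∈ rh then (acc.1, acc.2.1 + 1, o)
      else if PySem.Chars.lowerChar s ∈ lh then (acc.1 + 1, acc.2.1, o)
      else (acc.1, acc.2.1, o + 1)) (l, r, o)
    = (l + cs.countP (fun s => PySem.Chars.lowerChar s ∉ rh ∧ PySem.Chars.lowerChar s ∈ lh),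
       r + cs.countP (fun s => PySem.Chars.lowerChar s ∈ rh),
       o + cs.countP (fun s => PySem.Chars.isupper s)
         + cs.countP (fun s => PySem.Chars.lowerChar s ∉ rh ∧ PySem.Chars.lowerChar s ∉ lh)) := by
  intro cs
  induction cs with
  | nil => simp
  | cons c cs ih =>
      intro l r o
      simp only [List.foldl_cons, List.countP_cons]
      by_cases h0 : PySem.Chars.isupper c = true <;>
        [rw [if_pos h0]; rw [if_neg h0]] <;>
        (by_cases h1 : PySem.Chars.lowerChar c ∈ rh
         · rw [if_pos h1, ih, Prod.mk.injEq, Prod.mk.injEq]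
           refine ⟨?_, ?_, ?_⟩ <;> simp [h0, h1] <;> omega
         · by_cases h2 : PySem.Chars.lowerChar c ∈ lh
           · rw [if_neg h1, if_pos h2, ih, Prod.mk.injEq, Prod.mk.injEq]
             refine ⟨?_, ?_, ?_⟩ <;> simp [h0, h1, h2] <;> omega
           · rw [if_neg h1, if_neg h2, ih, Prod.mk.injEq, Prod.mk.injEq]
             refine ⟨?_, ?_, ?_⟩ <;> simp [h0, h1, h2] <;> omega)

-- ===== VERDICT (by name: the statement is the Claim_ definition above) =====
theorem count_keystrokes_spec : Claim_equal_count_keystrokes := by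
  intro sentence _
  unfold Spec_count_keystrokes
  simp only [count_keystrokes, count_keystrokes_alt, pvLower_eq_map, pvUpperCount,
    pvClassify, pvClassifyB, List.countP_map, Function.comp_def, Nat.zero_add,
    pvBalance_closed]
  split_ifs <;> rfl
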